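-- pv_equiv track=rewrite | github.com/houkemian/ener_quote | backend/app/services/paddle_signature.py | _parse_paddle_signature_header
-- ===== SOURCE A (Python) =====
-- from typing import Optional
--
-- def _parse_paddle_signature_header(header: str) -> tuple[Optional[str], list[str]]:
--     """Parse ``Paddle-Signature: ts=...;h1=...`` (supports multiple ``h1`` during rotation)."""
--     ts: Optional[str] = None
--     h1_values: list[str] = []
--     for part in header.split(";"):
--         part = part.strip()
--         if "=" not in part:
--             continue
--         key, value = part.split("=", 1)
--         key, value = key.strip(), value.strip()
--         if key == "ts":
--             ts = value
--         elif key == "h1":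
--             h1_values.append(value)
--     return ts, h1_values
-- ===== SOURCE B (Python) =====
-- def _parse_paddle_signature_header(header):
--     """Staged: tokenize all key/value pairs first, then scan the pairs
--     backwards for the last 'ts' and filter forwards for the 'h1' values."""
--     pairs = [tuple(s.strip() for s in part.strip().split("=", 1))
--              for part in header.split(";") if "=" in part.strip()]
--     ts = next((v for k, v in reversed(pairs) if k == "ts"), None)
--     h1_values = [v for k, v in pairs if k == "h1"]
--     return ts, h1_values
-- ===== Notes on version B (the rewrite author's own statement) =====
-- stated objective: alternative
-- what changed: Replaces A's single pass with mutable last-wins ts/append h1 state by a staged pipeline: first tokenize the header into a list of (key, value) pairs, then find ts by a first-match scan over the REVERSED pair list and obtain h1 by a separate filter pass.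
import Mathlib
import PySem

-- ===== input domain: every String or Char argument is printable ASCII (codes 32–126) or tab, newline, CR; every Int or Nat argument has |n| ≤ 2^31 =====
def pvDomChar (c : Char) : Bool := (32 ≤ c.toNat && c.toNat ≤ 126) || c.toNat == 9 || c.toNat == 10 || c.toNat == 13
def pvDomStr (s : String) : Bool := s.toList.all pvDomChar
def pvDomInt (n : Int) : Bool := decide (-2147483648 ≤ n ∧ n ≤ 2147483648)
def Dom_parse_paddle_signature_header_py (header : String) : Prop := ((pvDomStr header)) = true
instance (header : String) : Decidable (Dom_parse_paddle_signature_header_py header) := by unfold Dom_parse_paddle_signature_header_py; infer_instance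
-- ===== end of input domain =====

-- B is a staged pipeline: tokenize into (key,value) pairs, then reversed-scan for ts and filter for h1 (objective: alternative decomposition).

-- ===== PORT A =====
def pvStepA (st : Option String × List String) (part0 : String) : Option String × List String :=
  let part := PySem.Str.strip part0
  if PySem.Str.isIn "=" part then
    match PySem.Str.splitMax? part "=" 1 with
    | some (k :: v :: _) =>
        let key := PySem.Str.strip k
        let value := PySem.Str.strip v
        if key = "ts" then (some value, st.2)
        else if key = "h1" then (st.1, st.2 ++ [value])
        else st
    | _ => st
  else st

-- header.split(";"): sep ";" is nonempty, so split? is always `some`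
def parse_paddle_signature_header_py (header : String) : Option String × List String :=
  ((PySem.Str.split? header ";").getD []).foldl pvStepA (none, [])

-- ===== PORT B =====
-- one part of the comprehension: strip, keep only parts containing '=', split once, strip both sides
def pvParse1 (part0 : String) : Option (String × String) :=
  let part := PySem.Str.strip part0
  if PySem.Str.isIn "=" part then
    match PySem.Str.splitMax? part "=" 1 with
    | some (k :: v :: _) => some (PySem.Str.strip k, PySem.Str.strip v)
    | _ => none
  else none

def parse_paddle_signature_header_py_alt (header : String) : Option String × List String :=
  let pairs := ((PySem.Str.split? header ";").getD []).filterMap pvParse1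
  ((pairs.reverse.find? (fun kv => kv.1 == "ts")).map (fun kv => kv.2),
   (pairs.filter (fun kv => kv.1 == "h1")).map (fun kv => kv.2))

-- ===== PRECONDITION & SPEC =====
def Spec_parse_paddle_signature_header_py (header : String) (out : Option String × List String) : Prop := out = parse_paddle_signature_header_py_alt header
instance (header : String) (out : Option String × List String) : Decidable (Spec_parse_paddle_signature_header_py header out) := by unfold Spec_parse_paddle_signature_header_py; infer_instance

-- ===== CLAIM (what is proved, stated in full; the proofs are below) =====
def Claim_equal_parse_paddle_signature_header_py : Prop := ∀ (header : String), Dom_parse_paddle_signature_header_py header → Spec_parse_paddle_signature_header_py header (parse_paddle_signature_header_py header)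

-- ===== LEMMAS AND PROOFS =====
def pvOut (pairs : List (String × String)) (st : Option String × List String) :
    Option String × List String :=
  (((pairs.reverse.find? (fun kv => kv.1 == "ts")).map (fun kv => kv.2)).orElse (fun _ => st.1),
   st.2 ++ (pairs.filter (fun kv => kv.1 == "h1")).map (fun kv => kv.2))

theorem pv_inv (parts : List String) (st : Option String × List String) :
    parts.foldl pvStepA st = pvOut (parts.filterMap pvParse1) st := by
  induction parts generalizing st with
  | nil => simp [pvOut]
  | cons p rest ih =>
    simp only [List.foldl_cons, List.filterMap_cons]
    rw [ih]
    by_cases hc : PySem.Chars.isIn ['='] (PySem.Chars.strip p.toList) = true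
    · rcases hsp : PySem.Str.splitMax? (PySem.Str.strip p) "=" 1 with _ | ⟨_ | ⟨k, _ | ⟨v, tl⟩⟩⟩
      · simp [pvStepA, pvParse1, hc, hsp]
      · simp [pvStepA, pvParse1, hc, hsp]
      · simp [pvStepA, pvParse1, hc, hsp]
      · have hp : pvParse1 p = some (PySem.Str.strip k, PySem.Str.strip v) := by
          simp [pvParse1, hc, hsp]
        rw [hp]
        by_cases hts : PySem.Str.strip k = "ts"
        · cases hf : (rest.filterMap pvParse1).reverse.find? (fun kv => kv.1 == "ts") <;>
            simp [pvStepA, pvOut, hc, hsp, hts, List.find?_append, hf, Option.orElse]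
        · by_cases hh1 : PySem.Str.strip k = "h1"
          · simp [pvStepA, pvOut, hc, hsp, hh1, List.find?_append, Option.orElse]
          · simp [pvStepA, pvOut, hc, hsp, hts, hh1, List.find?_append, Option.orElse]
    · simp [pvStepA, pvParse1, hc]

-- ===== VERDICT (by name: the statement is the Claim_ definition above) =====
theorem parse_paddle_signature_header_py_spec : Claim_equal_parse_paddle_signature_header_py := by
  intro header _
  unfold Spec_parse_paddle_signature_header_py parse_paddle_signature_header_py
    parse_paddle_signature_header_py_alt
  rw [pv_inv]
  simp [pvOut]
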